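-- pv_equiv track=rewrite | github.com/simon-bachhuber/imt | src/imt/wrappers/_dead_reckoning.py | _find_false_sequences
-- ===== SOURCE A (Python) =====
-- def _find_false_sequences(boolean_array):
--     false_sequences = []
--     in_sequence = False
--     start_index = -1
--
--     for i, value in enumerate(boolean_array):
--         if not value and not in_sequence:
--             # Start of a new sequence
--             start_index = i
--             in_sequence = True
--         elif value and in_sequence:
--             # End of a sequence
--             false_sequences.append((start_index, i - 1))
--             in_sequence = False
--
--     # Handle the case where the array ends with a sequence of 0s
--     if in_sequence:
--         false_sequences.append((start_index, len(boolean_array) - 1))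
--
--     return false_sequences
-- ===== SOURCE B (Python) =====
-- from itertools import groupby
--
-- def _find_false_sequences(boolean_array):
--     # group maximal runs by truthiness; emit (start, end) for each falsy run
--     result = []
--     start = 0
--     for is_false, group in groupby(boolean_array, key=lambda v: not v):
--         n = sum(1 for _ in group)
--         if is_false:
--             result.append((start, start + n - 1))
--         start += n
--     return result
-- ===== Notes on version B (the rewrite author's own statement) =====
-- stated objective: idiomatic
-- what changed: Replaces the explicit in_sequence/start_index state machine with an itertools.groupby pass over maximal truthiness runs, emitting one (start, end) pair per falsy run.
import Mathlib
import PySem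

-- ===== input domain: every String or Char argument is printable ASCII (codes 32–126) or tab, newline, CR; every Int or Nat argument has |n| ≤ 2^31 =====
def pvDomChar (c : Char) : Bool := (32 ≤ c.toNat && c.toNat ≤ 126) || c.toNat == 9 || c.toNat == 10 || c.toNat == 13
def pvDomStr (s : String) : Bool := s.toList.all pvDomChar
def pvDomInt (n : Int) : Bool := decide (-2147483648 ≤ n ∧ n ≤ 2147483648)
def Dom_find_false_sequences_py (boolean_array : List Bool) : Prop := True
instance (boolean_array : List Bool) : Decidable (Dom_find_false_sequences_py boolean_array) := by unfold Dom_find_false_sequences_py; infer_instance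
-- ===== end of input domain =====

-- B replaces A's explicit in_sequence/start_index state machine with a groupby-style
-- pass over maximal truthiness runs (objective: idiomatic; same O(n) cost).

-- ===== PORT A =====
-- the for-loop of A: state (false_sequences, in_sequence, start_index), index i
def ffsLoop (acc : List (Int × Int)) (inSeq : Bool) (start : Int) (i : Int) :
    List Bool → List (Int × Int) × Bool × Int
  | [] => (acc, inSeq, start)
  | v :: rest =>
    if !v && !inSeq then ffsLoop acc true i (i + 1) rest
    else if v && inSeq then ffsLoop (acc ++ [(start, i - 1)]) false start (i + 1) rest
    else ffsLoop acc inSeq start (i + 1) rest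

def find_false_sequences_py (boolean_array : List Bool) : List (Int × Int) :=
  let r := ffsLoop [] false (-1) 0 boolean_array
  if r.2.1 then r.1 ++ [(r.2.2, (boolean_array.length : Int) - 1)] else r.1

-- ===== PORT B =====
-- one step per maximal run of equal truthiness (B's groupby loop)
def ffsGroups : List Bool → Int → List (Int × Int)
  | [], _ => []
  | b :: t, start =>
    let n := ((b :: t).takeWhile (fun v => v == b)).length
    (if b then [] else [(start, start + (n : Int) - 1)]) ++
      ffsGroups ((b :: t).dropWhile (fun v => v == b)) (start + (n : Int))
termination_by xs _ => xs.length
decreasing_by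
  simp [List.dropWhile]
  exact List.length_dropWhile_le _ _

def find_false_sequences_py_alt (boolean_array : List Bool) : List (Int × Int) :=
  ffsGroups boolean_array 0

-- ===== PRECONDITION & SPEC =====
def Spec_find_false_sequences_py (boolean_array : List Bool) (out : List (Int × Int)) : Prop := out = find_false_sequences_py_alt boolean_array
instance (boolean_array : List Bool) (out : List (Int × Int)) : Decidable (Spec_find_false_sequences_py boolean_array out) := by unfold Spec_find_false_sequences_py; infer_instance

-- ===== CLAIM (what is proved, stated in full; the proofs are below) =====
def Claim_equal_find_false_sequences_py : Prop := ∀ (boolean_array : List Bool), Dom_find_false_sequences_py boolean_array → Spec_find_false_sequences_py boolean_array (find_false_sequences_py boolean_array)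

-- ===== LEMMAS AND PROOFS =====

-- the trailing "if in_sequence" step of A, abstracted over the end index
def ffsFinish (r : List (Int × Int) × Bool × Int) (n : Int) : List (Int × Int) :=
  if r.2.1 then r.1 ++ [(r.2.2, n - 1)] else r.1

-- replace the first run's start index (B mid-run viewed as a fresh run)
def fixHead (s : Int) : List (Int × Int) → List (Int × Int)
  | [] => []
  | (_, e) :: t => (s, e) :: t

theorem ffsGroups_true (rest : List Bool) (i : Int) :
    ffsGroups (true :: rest) i = ffsGroups rest (i + 1) := by
  cases rest with
  | nil => simp [ffsGroups]
  | cons b t =>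
    cases b with
    | true =>
      rw [ffsGroups.eq_2, ffsGroups.eq_2]
      simp [List.takeWhile, List.dropWhile]
      ring_nf
    | false =>
      rw [ffsGroups.eq_2]
      simp [List.takeWhile, List.dropWhile]

theorem ffsGroups_false_head (rest : List Bool) (i : Int) :
    ∃ e t, ffsGroups (false :: rest) i = (i, e) :: t := by
  rw [ffsGroups.eq_2]; simp

theorem fixHead_ffsGroups_false_false (rest : List Bool) (i : Int) (s : Int) :
    fixHead s (ffsGroups (false :: false :: rest) (i - 1)) =
      fixHead s (ffsGroups (false :: rest) i) := by
  rw [ffsGroups.eq_2, ffsGroups.eq_2]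
  simp [List.takeWhile, List.dropWhile, fixHead]

theorem ffsLoop_spec (xs : List Bool) :
    (∀ (acc : List (Int × Int)) (s i : Int),
      ffsFinish (ffsLoop acc false s i xs) (i + xs.length) = acc ++ ffsGroups xs i) ∧
    (∀ (acc : List (Int × Int)) (s i : Int),
      ffsFinish (ffsLoop acc true s i xs) (i + xs.length) =
        acc ++ fixHead s (ffsGroups (false :: xs) (i - 1))) := by
  induction xs with
  | nil =>
    constructor
    · intro acc s i; simp [ffsLoop, ffsFinish, ffsGroups]
    · intro acc s i
      rw [ffsGroups.eq_2]
      simp [ffsLoop, ffsFinish, ffsGroups, fixHead]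
  | cons v rest ih =>
    obtain ⟨ihF, ihT⟩ := ih
    constructor
    · intro acc s i
      cases v with
      | true =>
        rw [ffsLoop]
        simp only [Bool.not_true, Bool.not_false, Bool.false_and, Bool.true_and, Bool.and_false, Bool.and_true, Bool.false_eq_true, if_true, if_false]
        rw [show (i + ((true :: rest).length : Int)) = (i + 1) + rest.length by simp; ring]
        rw [ihF acc s (i + 1), ffsGroups_true]
      | false =>
        rw [ffsLoop]
        simp only [Bool.not_true, Bool.not_false, Bool.false_and, Bool.true_and, Bool.and_false, Bool.and_true, Bool.false_eq_true, if_true, if_false]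
        rw [show (i + ((false :: rest).length : Int)) = (i + 1) + rest.length by simp; ring]
        rw [ihT acc i (i + 1)]
        have : fixHead i (ffsGroups (false :: rest) (i + 1 - 1)) = ffsGroups (false :: rest) i := by
          obtain ⟨e, t, h⟩ := ffsGroups_false_head rest i
          rw [show i + 1 - 1 = i by ring, h]; simp [fixHead]
        rw [this]
    · intro acc s i
      cases v with
      | true =>
        rw [ffsLoop]
        simp only [Bool.not_true, Bool.not_false, Bool.false_and, Bool.true_and, Bool.and_false, Bool.and_true, Bool.false_eq_true, if_true, if_false]
        rw [show (i + ((true :: rest).length : Int)) = (i + 1) + rest.length by simp; ring]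
        rw [ihF (acc ++ [(s, i - 1)]) s (i + 1)]
        rw [ffsGroups.eq_2]
        simp [List.takeWhile, List.dropWhile, fixHead, ffsGroups_true]
      | false =>
        rw [ffsLoop]
        simp only [Bool.not_true, Bool.not_false, Bool.false_and, Bool.true_and, Bool.and_false, Bool.and_true, Bool.false_eq_true, if_true, if_false]
        rw [show (i + ((false :: rest).length : Int)) = (i + 1) + rest.length by simp; ring]
        rw [ihT acc s (i + 1)]
        rw [show i + 1 - 1 = i by ring, fixHead_ffsGroups_false_false]

-- ===== VERDICT (by name: the statement is the Claim_ definition above) =====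
theorem find_false_sequences_py_spec : Claim_equal_find_false_sequences_py := by
  intro xs _
  unfold Spec_find_false_sequences_py find_false_sequences_py find_false_sequences_py_alt
  have h := (ffsLoop_spec xs).1 [] (-1) 0
  simp only [zero_add] at h
  unfold ffsFinish at h
  simp only [List.nil_append] at h
  exact h
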